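-- pv_equiv track=rewrite | github.com/duria-n/badou-ai-Tsinghua-2023 | 238-西安-邢奔奔/week14/nets/frcnn_training.py | get_image_output_length
-- ===== SOURCE A (Python) =====
-- def get_image_output_length(width,height):
--     """
--         计算卷积后的输出尺寸
--     :param width:
--     :param height:
--     :return:
--     """
--     def get_output_length(input_length):
--         filter_size = [7,3,1,1]
--         padding = [3,1,0,0]
--         stride = 2
--         for i in range(4):
--             #这里就是求卷积输出尺寸的公式
--             #input_length = (input_legth-filter_size) // stride + 1
--             input_length = (input_length+2*padding[i]-filter_size[i]) // stride + 1
--         return input_length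
--     return get_output_length(width), get_output_length(height)
-- ===== SOURCE B (Python) =====
-- def get_image_output_length(width, height):
--     # The four conv stages all reduce L -> (L-1)//2 + 1 = ceil(L/2); composing
--     # four ceil-halvings is a ceiling division by 16, so one closed form suffices.
--     return (width + 15) // 16, (height + 15) // 16
-- ===== Notes on version B (the rewrite author's own statement) =====
-- stated objective: simpler
-- what changed: Replaced the 4-iteration loop over filter/padding tables with a single closed-form ceiling division: each stage is L -> (L-1)//2+1 = ceil(L/2), so the composite is (L+15)//16.
import Mathlib
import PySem

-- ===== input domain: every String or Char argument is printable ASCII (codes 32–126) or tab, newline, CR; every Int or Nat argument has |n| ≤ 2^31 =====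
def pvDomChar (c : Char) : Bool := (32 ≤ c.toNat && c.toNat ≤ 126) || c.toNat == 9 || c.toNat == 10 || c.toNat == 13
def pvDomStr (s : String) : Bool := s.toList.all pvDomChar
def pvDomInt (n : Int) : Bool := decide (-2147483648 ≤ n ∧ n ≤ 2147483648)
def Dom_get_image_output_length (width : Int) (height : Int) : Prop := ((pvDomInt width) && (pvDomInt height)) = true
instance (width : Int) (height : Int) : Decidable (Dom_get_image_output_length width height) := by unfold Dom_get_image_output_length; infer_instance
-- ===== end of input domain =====

-- B replaces A's 4-step table-driven loop by one closed-form ceiling division per dimension (simpler).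


-- ===== PORT A =====
-- A's inner helper: fold over range(4) indexing the filter/padding tables, as in the Python.
def pvGetOutputLength (input_length : Int) : Int :=
  let filter_size : List Int := [7, 3, 1, 1]
  let padding : List Int := [3, 1, 0, 0]
  let stride : Int := 2
  (PySem.List.pyRange 0 4 1).foldl
    (fun input_length i =>
      PySem.Int.floordiv
        (input_length + 2 * PySem.List.pyGetD padding i 0 - PySem.List.pyGetD filter_size i 0)
        stride + 1)
    input_length

def get_image_output_length (width : Int) (height : Int) : Int × Int :=
  (pvGetOutputLength width, pvGetOutputLength height)

-- ===== PORT B =====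
-- B: one closed-form ceiling division per dimension.
def get_image_output_length_alt (width : Int) (height : Int) : Int × Int :=
  (PySem.Int.floordiv (width + 15) 16, PySem.Int.floordiv (height + 15) 16)

-- ===== PRECONDITION & SPEC =====
def Spec_get_image_output_length (width : Int) (height : Int) (out : Int × Int) : Prop := out = get_image_output_length_alt width height
instance (width : Int) (height : Int) (out : Int × Int) : Decidable (Spec_get_image_output_length width height out) := by unfold Spec_get_image_output_length; infer_instance

-- ===== CLAIM (what is proved, stated in full; the proofs are below) =====
def Claim_equal_get_image_output_length : Prop := ∀ (width : Int) (height : Int), Dom_get_image_output_length width height → Spec_get_image_output_length width height (get_image_output_length width height)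

-- ===== LEMMAS AND PROOFS =====

-- ===== VERDICT (by name: the statement is the Claim_ definition above) =====
theorem pvGetOutputLength_eq (L : Int) :
    pvGetOutputLength L = PySem.Int.floordiv (L + 15) 16 := by
  simp [pvGetOutputLength, PySem.List.pyRange, PySem.List.pyGetD, PySem.List.pyGet?,
        PySem.List.pyIdx?, List.range_succ]
  omega


theorem get_image_output_length_spec : Claim_equal_get_image_output_length := by
  intro width height _
  show _ = _
  simp [get_image_output_length, get_image_output_length_alt, pvGetOutputLength_eq]
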